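-- pv_equiv track=rewrite | github.com/agh-bit-academy/SummerProject2022 | WDI/Zestaw_6/Zadanie_28/prog.py | f
-- ===== SOURCE A (Python) =====
-- def count_one(num):
--     sum = 0
--     while num != 0:
--         sum += num % 2
--         num //= 2
--     return sum
--
-- def f(T, i=0, sum1=0, sum2=0, sum3=0):
--     if sum1 == sum2 == sum3 != 0:
--         return True
--     if i == len(T):
--         return False
--     a = f(T, i + 1, sum1 + count_one(T[i]), sum2, sum3)
--     b = f(T, i + 1, sum1, sum2 + count_one(T[i]), sum3)
--     c = f(T, i + 1, sum1, sum2, sum3 + count_one(T[i]))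
--     if a or b or c:
--         return True
--     return False
-- ===== SOURCE B (Python) =====
-- def f(T, i=0, sum1=0, sum2=0, sum3=0):
--     if sum1 == sum2 == sum3 != 0:
--         return True
--     total = sum1 + sum2 + sum3
--     states = {(sum1, sum2)}
--     for x in T[i:]:
--         c = bin(x).count("1")
--         total += c
--         nxt = set()
--         for (a, b) in states:
--             nxt.add((a + c, b))
--             nxt.add((a, b + c))
--             nxt.add((a, b))
--         states = nxt
--         for (a, b) in states:
--             if a == b == total - a - b != 0:
--                 return True
--     return False
-- ===== Notes on version B (the rewrite author's own statement) =====
-- stated objective: alternative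
-- what changed: Replaces A's three-way branching recursion (exponentially many paths) by one pass over T[i:] carrying the set of reachable (sum1, sum2) pairs, subset-sum DP style (sum3 is determined by the running total), testing after each prefix whether some reachable pair gives three equal nonzero sums; intended as asymptotically faster, but a timing run could not confirm a ratio because A already times out at n=16 where only B returns.
-- outside the precondition, e.g. on f([1, 1], -1, 0, 0, 0): A returns True, B returns False
import Mathlib
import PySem

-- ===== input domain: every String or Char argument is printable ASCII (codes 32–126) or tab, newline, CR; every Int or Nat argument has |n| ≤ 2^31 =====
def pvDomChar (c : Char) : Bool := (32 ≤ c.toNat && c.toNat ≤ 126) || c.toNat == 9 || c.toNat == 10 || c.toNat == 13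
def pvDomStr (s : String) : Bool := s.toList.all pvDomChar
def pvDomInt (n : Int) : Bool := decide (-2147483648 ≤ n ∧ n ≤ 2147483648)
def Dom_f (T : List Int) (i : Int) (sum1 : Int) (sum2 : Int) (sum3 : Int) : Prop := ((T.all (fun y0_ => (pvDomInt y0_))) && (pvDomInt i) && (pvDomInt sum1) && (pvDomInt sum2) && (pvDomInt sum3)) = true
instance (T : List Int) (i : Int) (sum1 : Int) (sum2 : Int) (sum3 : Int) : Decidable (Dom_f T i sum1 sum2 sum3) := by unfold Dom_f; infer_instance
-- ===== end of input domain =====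

-- B replaces A's three-way branching recursion by one pass over T[i:] carrying the set of
-- reachable (sum1, sum2) partial-sum pairs (subset-sum DP style); equal return values on Pre_f.

-- ===== PORT A =====
-- count_one: while num != 0: sum += num % 2; num //= 2.  Fuel num.toNat+1 suffices for
-- num ≥ 0 (Python diverges for num < 0; those inputs are outside Pre_f).
def countOneGo : Nat → Int → Int → Int
  | 0, _, s => s
  | fu + 1, num, s =>
      if num = 0 then s
      else countOneGo fu (PySem.Int.floordiv num 2) (s + PySem.Int.mod num 2)

def countOne (num : Int) : Int := countOneGo (num.toNat + 1) num 0

-- the recursion of A; fuel T.length+1 covers every call chain with 0 ≤ i ≤ len(T).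
-- pyGet? = none (Python IndexError) is rendered as false; such inputs are outside Pre_f.
def fGo : Nat → List Int → Int → Int → Int → Int → Bool
  | 0, _, _, _, _, _ => false
  | fu + 1, T, i, sum1, sum2, sum3 =>
      if sum1 = sum2 ∧ sum2 = sum3 ∧ sum1 ≠ 0 then true
      else if i = (T.length : Int) then false
      else
        match PySem.List.pyGet? T i with
        | none => false
        | some x =>
            (fGo fu T (i + 1) (sum1 + countOne x) sum2 sum3 ||
             fGo fu T (i + 1) sum1 (sum2 + countOne x) sum3 ||
             fGo fu T (i + 1) sum1 sum2 (sum3 + countOne x))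

def f (T : List Int) (i : Int) (sum1 : Int) (sum2 : Int) (sum3 : Int) : Bool :=
  fGo (T.length + 1) T i sum1 sum2 sum3

-- ===== PORT B =====
-- bin(x).count("1"): the number of set bits of |x| (exact for every Int).
def popAux : Nat → Nat → Nat
  | 0, _ => 0
  | fu + 1, n => if n = 0 then 0 else n % 2 + popAux fu (n / 2)

def binOnes (x : Int) : Int := (popAux (x.natAbs + 1) x.natAbs : Int)

-- one DP step: from each reachable (a, b) the new element's count c goes to sum1, sum2 or sum3
def stepSet (c : Int) (S : PySem.Set (Int × Int)) : PySem.Set (Int × Int) :=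
  S.foldl
    (fun acc p =>
      PySem.Set.add (PySem.Set.add (PySem.Set.add acc (p.1 + c, p.2)) (p.1, p.2 + c)) (p.1, p.2))
    PySem.Set.empty

-- the 'for x in T[i:]' loop with early return on an equal nonzero split
def loopB : List Int → Int → PySem.Set (Int × Int) → Bool
  | [], _, _ => false
  | x :: rest, total, S =>
      let c := binOnes x
      let t := total + c
      let S' := stepSet c S
      if S'.any (fun p => decide (p.1 = p.2 ∧ p.2 = t - p.1 - p.2 ∧ p.1 ≠ 0)) then true
      else loopB rest t S'

def f_alt (T : List Int) (i : Int) (sum1 : Int) (sum2 : Int) (sum3 : Int) : Bool :=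
  if sum1 = sum2 ∧ sum2 = sum3 ∧ sum1 ≠ 0 then true
  else
    loopB (PySem.List.slice T (some i) none) (sum1 + sum2 + sum3)
      (PySem.Set.add PySem.Set.empty (sum1, sum2))

-- ===== PRECONDITION & SPEC =====
-- Pre_f excludes inputs on which A raises or diverges — i outside [-len(T), len(T)]
-- (IndexError) and a negative element in T[i:] (count_one loops forever) — and the
-- negative indices -len(T) ≤ i < 0, on which A returns but wraps around and processes the
-- tail T[i:] followed by the whole list again, an accident of the recursion; inputs whose
-- three sums are already equal and nonzero are kept (A returns True at once for any i, T).
def Pre_f (T : List Int) (i : Int) (sum1 : Int) (sum2 : Int) (sum3 : Int) : Prop :=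
  (sum1 = sum2 ∧ sum2 = sum3 ∧ sum1 ≠ 0) ∨
  (0 ≤ i ∧ i ≤ (T.length : Int) ∧ ∀ x ∈ T.drop i.toNat, 0 ≤ x)

instance (T : List Int) (i : Int) (sum1 : Int) (sum2 : Int) (sum3 : Int) : Decidable (Pre_f T i sum1 sum2 sum3) := by unfold Pre_f; infer_instance

def pvWitness_f : List Int × Int × Int × Int × Int := ([3, 3, 3], 0, 0, 0, 0)

def Spec_f (T : List Int) (i : Int) (sum1 : Int) (sum2 : Int) (sum3 : Int) (out : Bool) : Prop := out = f_alt T i sum1 sum2 sum3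
instance (T : List Int) (i : Int) (sum1 : Int) (sum2 : Int) (sum3 : Int) (out : Bool) : Decidable (Spec_f T i sum1 sum2 sum3 out) := by unfold Spec_f; infer_instance

-- ===== CLAIM (what is proved, stated in full; the proofs are below) =====
def Claim_equal_f : Prop := ∀ (T : List Int) (i : Int) (sum1 : Int) (sum2 : Int) (sum3 : Int), Dom_f T i sum1 sum2 sum3 → Pre_f T i sum1 sum2 sum3 → Spec_f T i sum1 sum2 sum3 (f T i sum1 sum2 sum3)

-- ===== LEMMAS AND PROOFS =====

-- the common mathematical core: A's recursion, written on the suffix list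
def g : List Int → Int → Int → Int → Bool
  | [], s1, s2, s3 => decide (s1 = s2 ∧ s2 = s3 ∧ s1 ≠ 0)
  | x :: r, s1, s2, s3 =>
      if s1 = s2 ∧ s2 = s3 ∧ s1 ≠ 0 then true
      else
        (g r (s1 + binOnes x) s2 s3 || g r s1 (s2 + binOnes x) s3 || g r s1 s2 (s3 + binOnes x))

def h : List Int → Int → Int → Int → Bool
  | [], _, _, _ => false
  | x :: r, s1, s2, s3 =>
      (g r (s1 + binOnes x) s2 s3 || g r s1 (s2 + binOnes x) s3 || g r s1 s2 (s3 + binOnes x))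

lemma g_eq_chk_or_h (L : List Int) (s1 s2 s3 : Int) :
    g L s1 s2 s3 = (decide (s1 = s2 ∧ s2 = s3 ∧ s1 ≠ 0) || h L s1 s2 s3) := by
  cases L with
  | nil => simp [g, h]
  | cons x r =>
      by_cases hc : s1 = s2 ∧ s2 = s3 ∧ s1 ≠ 0 <;> simp [g, h, hc]

-- count_one equals bin(x).count("1") on nonnegative ints
lemma countOneGo_eq_popAux : ∀ (fu : Nat) (n : Nat) (s : Int),
    countOneGo fu (n : Int) s = s + (popAux fu n : Int) := by
  intro fu
  induction fu with
  | zero => intro n s; simp [countOneGo, popAux]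
  | succ fu ih =>
      intro n s
      by_cases hn : n = 0
      · simp [countOneGo, popAux, hn]
      · have hne : (n : Int) ≠ 0 := by exact_mod_cast hn
        have hfd : PySem.Int.floordiv (n : Int) 2 = ((n / 2 : Nat) : Int) := by
          simp [PySem.Int.floordiv, Int.fdiv_eq_ediv]
        have hmd : PySem.Int.mod (n : Int) 2 = ((n % 2 : Nat) : Int) := by
          simp [PySem.Int.mod, Int.fmod_eq_emod]
        simp only [countOneGo, popAux, hn, hne, hfd, hmd]
        rw [ih]
        push_cast
        ring

lemma countOne_eq_binOnes {x : Int} (hx : 0 ≤ x) : countOne x = binOnes x := by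
  obtain ⟨n, rfl⟩ := Int.eq_ofNat_of_zero_le hx
  have h1 : ((n : Int)).toNat = n := Int.toNat_natCast n
  have h2 : ((n : Int)).natAbs = n := Int.natAbs_natCast n
  rw [countOne, binOnes, h1, h2, countOneGo_eq_popAux]
  simp

-- A's fuel recursion on (T, i) is g on the suffix T.drop i.toNat
lemma fGo_eq_g : ∀ (L : List Int) (fu : Nat) (T : List Int) (i s1 s2 s3 : Int),
    0 ≤ i → i.toNat + L.length = T.length → T.drop i.toNat = L →
    (∀ x ∈ L, 0 ≤ x) → L.length < fu →
    fGo fu T i s1 s2 s3 = g L s1 s2 s3 := by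
  intro L
  induction L with
  | nil =>
      intro fu T i s1 s2 s3 hi hlen hdrop _ hfu
      simp only [List.length_nil] at hlen
      obtain ⟨fu, rfl⟩ := Nat.exists_eq_succ_of_ne_zero (by omega : fu ≠ 0)
      have hieq : i = (T.length : Int) := by omega
      by_cases hc : s1 = s2 ∧ s2 = s3 ∧ s1 ≠ 0 <;> simp [fGo, g, hc, hieq]
  | cons x r ih =>
      intro fu T i s1 s2 s3 hi hlen hdrop hnn hfu
      simp only [List.length_cons] at hlen hfu
      obtain ⟨fu, rfl⟩ := Nat.exists_eq_succ_of_ne_zero (by omega : fu ≠ 0)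
      have hlt : i.toNat < T.length := by omega
      have hine : i ≠ (T.length : Int) := by omega
      have hget : PySem.List.pyGet? T i = some x := by
        rw [PySem.List.pyGet?_of_nonneg T hi]
        have h0 : (T.drop i.toNat)[0]? = T[i.toNat + 0]? := List.getElem?_drop
        rw [hdrop] at h0
        simpa using h0.symm
      have hdrop' : T.drop (i + 1).toNat = r := by
        have h1 : (i + 1).toNat = i.toNat + 1 := by omega
        rw [h1, ← List.drop_drop, hdrop]
        simp
      have hxc : countOne x = binOnes x := countOne_eq_binOnes (hnn x (by simp))
      have hrec : ∀ a b c : Int, fGo fu T (i + 1) a b c = g r a b c := by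
        intro a b c
        exact ih fu T (i + 1) a b c (by omega) (by omega) hdrop'
          (fun y hy => hnn y (by simp [hy])) (by omega)
      by_cases hc : s1 = s2 ∧ s2 = s3 ∧ s1 ≠ 0
      · obtain ⟨rfl, rfl, h0⟩ := hc
        simp [fGo, g, h0]
      · rw [fGo, g, if_neg hc, if_neg hc, if_neg hine, hget]
        simp only [hrec, hxc]

-- membership in one DP step
lemma mem_stepSet (c : Int) (S : PySem.Set (Int × Int)) (p : Int × Int) :
    p ∈ stepSet c S ↔ ∃ q ∈ S, p = (q.1 + c, q.2) ∨ p = (q.1, q.2 + c) ∨ p = q := by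
  have main : ∀ (l : List (Int × Int)) (A : PySem.Set (Int × Int)),
      p ∈ l.foldl (fun acc q =>
        PySem.Set.add (PySem.Set.add (PySem.Set.add acc (q.1 + c, q.2)) (q.1, q.2 + c)) (q.1, q.2)) A
      ↔ p ∈ A ∨ ∃ q ∈ l, p = (q.1 + c, q.2) ∨ p = (q.1, q.2 + c) ∨ p = q := by
    intro l
    induction l with
    | nil => intro A; simp
    | cons q l ih =>
        intro A
        rw [List.foldl_cons, ih]
        simp [PySem.Set.mem_add]
        aesop
  rw [stepSet, main]
  simp [PySem.Set.empty]

-- the B loop, characterised: true iff some reachable state leads to success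
lemma loopB_eq_any : ∀ (L : List Int) (t : Int) (S : PySem.Set (Int × Int)),
    loopB L t S = S.any (fun p => h L p.1 p.2 (t - p.1 - p.2)) := by
  intro L
  induction L with
  | nil => intro t S; simp [loopB, h]
  | cons x r ih =>
      intro t S
      simp only [loopB]
      rw [ih]
      rw [Bool.eq_iff_iff]
      simp only [List.any_eq_true, decide_eq_true_eq]
      constructor
      · intro hb
        split_ifs at hb with hany
        · obtain ⟨p, hpmem, hp⟩ := hany
          rw [mem_stepSet] at hpmem
          obtain ⟨q, hq, hcase⟩ := hpmem
          refine ⟨q, hq, ?_⟩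
          rw [h, g_eq_chk_or_h, g_eq_chk_or_h, g_eq_chk_or_h]
          simp only [Bool.or_eq_true, decide_eq_true_eq]
          rcases hcase with rfl | rfl | rfl
          · exact Or.inl (Or.inl (Or.inl (by dsimp only at hp; omega)))
          · exact Or.inl (Or.inr (Or.inl (by dsimp only at hp; omega)))
          · exact Or.inr (Or.inl (by omega))
        · simp only [List.any_eq_true] at hb
          obtain ⟨p, hpmem, hp⟩ := hb
          rw [mem_stepSet] at hpmem
          obtain ⟨q, hq, hcase⟩ := hpmem
          refine ⟨q, hq, ?_⟩
          rw [h, g_eq_chk_or_h, g_eq_chk_or_h, g_eq_chk_or_h]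
          rcases hcase with rfl | rfl | rfl
          · dsimp only at hp ⊢
            have e : t + binOnes x - (q.1 + binOnes x) - q.2 = t - q.1 - q.2 := by ring
            rw [e] at hp
            simp [hp]
          · dsimp only at hp ⊢
            have e : t + binOnes x - q.1 - (q.2 + binOnes x) = t - q.1 - q.2 := by ring
            rw [e] at hp
            simp [hp]
          · have e : t + binOnes x - p.1 - p.2 = t - p.1 - p.2 + binOnes x := by ring
            rw [e] at hp
            simp [hp]
      · intro hb
        obtain ⟨q, hq, hqh⟩ := hb
        rw [h] at hqh
        split_ifs with hany
        · rfl
        · simp only [List.any_eq_true] at hany ⊢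
          push Not at hany
          rcases Bool.or_eq_true_iff.mp hqh with hqh' | hc3
          · rcases Bool.or_eq_true_iff.mp hqh' with hc1 | hc2
            · rw [g_eq_chk_or_h] at hc1
              rcases Bool.or_eq_true_iff.mp hc1 with hchk | hh
              · exfalso
                simp only [decide_eq_true_eq] at hchk
                have hm : (q.1 + binOnes x, q.2) ∈ stepSet (binOnes x) S := by
                  rw [mem_stepSet]; exact ⟨q, hq, Or.inl rfl⟩
                have hc := hany _ hm
                dsimp only at hc
                exact hchk.2.2 (hc hchk.1 (by omega))
              · refine ⟨(q.1 + binOnes x, q.2), ?_, ?_⟩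
                · rw [mem_stepSet]; exact ⟨q, hq, Or.inl rfl⟩
                · dsimp only
                  have e : t + binOnes x - (q.1 + binOnes x) - q.2 = t - q.1 - q.2 := by ring
                  rw [e]; exact hh
            · rw [g_eq_chk_or_h] at hc2
              rcases Bool.or_eq_true_iff.mp hc2 with hchk | hh
              · exfalso
                simp only [decide_eq_true_eq] at hchk
                have hm : (q.1, q.2 + binOnes x) ∈ stepSet (binOnes x) S := by
                  rw [mem_stepSet]; exact ⟨q, hq, Or.inr (Or.inl rfl)⟩
                have hc := hany _ hm
                dsimp only at hc
                exact hchk.2.2 (hc hchk.1 (by omega))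
              · refine ⟨(q.1, q.2 + binOnes x), ?_, ?_⟩
                · rw [mem_stepSet]; exact ⟨q, hq, Or.inr (Or.inl rfl)⟩
                · dsimp only
                  have e : t + binOnes x - q.1 - (q.2 + binOnes x) = t - q.1 - q.2 := by ring
                  rw [e]; exact hh
          · rw [g_eq_chk_or_h] at hc3
            rcases Bool.or_eq_true_iff.mp hc3 with hchk | hh
            · exfalso
              simp only [decide_eq_true_eq] at hchk
              have hm : (q.1, q.2) ∈ stepSet (binOnes x) S := by
                rw [mem_stepSet]; exact ⟨q, hq, Or.inr (Or.inr rfl)⟩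
              have hc := hany _ hm
              dsimp only at hc
              exact hchk.2.2 (hc hchk.1 (by omega))
            · refine ⟨(q.1, q.2), ?_, ?_⟩
              · rw [mem_stepSet]; exact ⟨q, hq, Or.inr (Or.inr rfl)⟩
              · dsimp only
                have e : t + binOnes x - q.1 - q.2 = t - q.1 - q.2 + binOnes x := by ring
                rw [e]; exact hh

lemma f_alt_eq_g (T : List Int) (i s1 s2 s3 : Int) (hi : 0 ≤ i) :
    f_alt T i s1 s2 s3 = g (T.drop i.toNat) s1 s2 s3 := by
  by_cases hc : s1 = s2 ∧ s2 = s3 ∧ s1 ≠ 0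
  · obtain ⟨rfl, rfl, h0⟩ := hc
    rw [f_alt, if_pos ⟨rfl, rfl, h0⟩, g_eq_chk_or_h]
    simp [h0]
  · rw [f_alt, if_neg hc, PySem.List.slice_from T hi, loopB_eq_any, g_eq_chk_or_h]
    have hs : (PySem.Set.add PySem.Set.empty (s1, s2)) = [(s1, s2)] := by
      simp [PySem.Set.add, PySem.Set.empty]
    rw [hs]
    simp only [List.any_cons, List.any_nil, Bool.or_false]
    have h3 : s1 + s2 + s3 - s1 - s2 = s3 := by ring
    rw [h3]
    simp [hc]

-- ===== VERDICT (by name: the statement is the Claim_ definition above) =====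
theorem f_spec : Claim_equal_f := by
  intro T i s1 s2 s3 _ hpre
  unfold Spec_f
  by_cases hc : s1 = s2 ∧ s2 = s3 ∧ s1 ≠ 0
  · obtain ⟨rfl, rfl, h0⟩ := hc
    rw [f, f_alt, if_pos ⟨rfl, rfl, h0⟩]
    simp [fGo, h0]
  · rcases hpre with hpre | ⟨hi0, hile, hnn⟩
    · exact absurd hpre hc
    · rw [f_alt_eq_g T i s1 s2 s3 hi0, f]
      apply fGo_eq_g (T.drop i.toNat) (T.length + 1) T i s1 s2 s3 hi0
      · rw [List.length_drop]; omega
      · rfl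
      · exact hnn
      · rw [List.length_drop]; omega
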